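-- pv_equiv track=rewrite | github.com/KazukiNoSuzaku/Leetcode | Python/1819_Number_of_Different_Subsequences_GCDs.py | countDifferentSubsequenceGCDs
-- ===== SOURCE A (Python) =====
-- def countDifferentSubsequenceGCDs(nums):
--     """
--     :type nums: List[int]
--     :rtype: int
--     """
--     from math import gcd
--     max_val = max(nums)
--     num_set = set(nums)
--     count = 0
--     for g in range(1, max_val + 1):
--         cur_gcd = 0
--         for mult in range(g, max_val + 1, g):
--             if mult in num_set:
--                 cur_gcd = gcd(cur_gcd, mult)
--                 if cur_gcd == g:
--                     break
--         if cur_gcd == g: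
--             count += 1
--     return count
-- ===== SOURCE B (Python) =====
-- def countDifferentSubsequenceGCDs(nums):
--     """
--     :type nums: List[int]
--     :rtype: int
--     """
--     from math import gcd
--     gcds = set()
--     for x in nums:
--         if x > 0:
--             new = {gcd(g, x) for g in gcds}
--             new.add(x)
--             gcds |= new
--     return len(gcds)
-- ===== Notes on version B (the rewrite author's own statement) =====
-- stated objective: alternative
-- what changed: Replaced the divisor-candidate scan (test every g in 1..max by gcd-ing its multiples present in the set) with an incremental DP that maintains the set of all achievable subsequence GCDs, merging {x} and {gcd(g,x)} per element, returning its size.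
import Mathlib
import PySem

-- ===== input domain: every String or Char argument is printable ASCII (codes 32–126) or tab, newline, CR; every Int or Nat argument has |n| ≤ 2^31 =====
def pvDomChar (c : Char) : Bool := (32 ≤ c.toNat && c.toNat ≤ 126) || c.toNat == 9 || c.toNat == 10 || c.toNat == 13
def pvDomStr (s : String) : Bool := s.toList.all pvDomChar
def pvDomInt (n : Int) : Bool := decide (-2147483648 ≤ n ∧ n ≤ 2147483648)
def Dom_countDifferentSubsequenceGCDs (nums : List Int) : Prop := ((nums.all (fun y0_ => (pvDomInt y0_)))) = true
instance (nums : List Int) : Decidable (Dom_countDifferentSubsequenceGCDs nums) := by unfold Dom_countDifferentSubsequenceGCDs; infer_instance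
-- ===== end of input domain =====

-- B replaces A's divisor-candidate scan by a DP that maintains the set of all achievable
-- subsequence GCDs incrementally (alternative algorithm, similar cost).

-- math.gcd(a, b): the nonnegative gcd of the absolute values (exact for Python ints)
def pygcd (a b : Int) : Int := (Int.gcd a b : Int)

-- ===== PORT A =====
-- inner 'for mult in range(g, max_val+1, g): …' loop with its early 'break'
def aInner (numSet : PySem.Set Int) (g : Int) : List Int → Int → Int
  | [], cur => cur
  | m :: rest, cur =>
    if PySem.Set.contains numSet m then
      let cur' := pygcd cur m
      if cur' = g then cur' else aInner numSet g rest cur'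
    else aInner numSet g rest cur

def countDifferentSubsequenceGCDs (nums : List Int) : Int :=
  match PySem.List.max? nums (fun x => x) with
  | none => 0   -- unreachable under Pre_: Python's max(nums) raises ValueError on []
  | some maxVal =>
    let numSet := PySem.Set.ofList nums
    (PySem.List.pyRange 1 (maxVal + 1) 1).foldl
      (fun count g =>
        if aInner numSet g (PySem.List.pyRange g (maxVal + 1) g) 0 = g
        then count + 1 else count) 0

-- ===== PORT B =====
-- one iteration of B's loop: gcds |= ({gcd(g, x) for g in gcds} ∪ {x}) when x > 0
def bStep (s : PySem.Set Int) (x : Int) : PySem.Set Int :=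
  if x > 0 then
    PySem.Set.union s (PySem.Set.add (PySem.Set.ofList (s.map (fun g => pygcd g x))) x)
  else s

def countDifferentSubsequenceGCDs_alt (nums : List Int) : Int :=
  PySem.Set.len (nums.foldl bStep PySem.Set.empty)

-- ===== PRECONDITION & SPEC =====
-- Pre_ excludes only the empty list, on which A's max(nums) raises ValueError (B returns 0 there).
def Pre_countDifferentSubsequenceGCDs (nums : List Int) : Prop := nums ≠ []
instance (nums : List Int) : Decidable (Pre_countDifferentSubsequenceGCDs nums) := by unfold Pre_countDifferentSubsequenceGCDs; infer_instance
def pvWitness_countDifferentSubsequenceGCDs : List Int := [6, 10, 3]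

def Spec_countDifferentSubsequenceGCDs (nums : List Int) (out : Int) : Prop := out = countDifferentSubsequenceGCDs_alt nums
instance (nums : List Int) (out : Int) : Decidable (Spec_countDifferentSubsequenceGCDs nums out) := by unfold Spec_countDifferentSubsequenceGCDs; infer_instance

-- ===== CLAIM (what is proved, stated in full; the proofs are below) =====
def Claim_equal_countDifferentSubsequenceGCDs : Prop := ∀ (nums : List Int), Dom_countDifferentSubsequenceGCDs nums → Pre_countDifferentSubsequenceGCDs nums → Spec_countDifferentSubsequenceGCDs nums (countDifferentSubsequenceGCDs nums)

-- ===== LEMMAS AND PROOFS =====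

-- basic gcd facts
lemma pygcd_nonneg (a b : Int) : 0 ≤ pygcd a b := Int.natCast_nonneg _

lemma pygcd_comm (a b : Int) : pygcd a b = pygcd b a := by
  simp [pygcd, Int.gcd_comm]

lemma pygcd_assoc (a b c : Int) : pygcd (pygcd a b) c = pygcd a (pygcd b c) := by
  simp [pygcd, Int.gcd_assoc]

lemma pygcd_zero_left (a : Int) (h : 0 ≤ a) : pygcd 0 a = a := by
  simp [pygcd, Int.gcd]
  omega

lemma pygcd_zero_right (a : Int) (h : 0 ≤ a) : pygcd a 0 = a := by
  rw [pygcd_comm]; exact pygcd_zero_left a h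

lemma pygcd_dvd_left (a b : Int) : pygcd a b ∣ a := Int.gcd_dvd_left a b
lemma pygcd_dvd_right (a b : Int) : pygcd a b ∣ b := Int.gcd_dvd_right a b

lemma dvd_pygcd {a b c : Int} (ha : c ∣ a) (hb : c ∣ b) : c ∣ pygcd a b := by
  have h := Int.dvd_gcd ((Int.natAbs_dvd).2 ha) ((Int.natAbs_dvd).2 hb)
  exact (Int.natAbs_dvd).1 (Int.natCast_dvd_natCast.2 h)

lemma pygcd_fix {g m : Int} (hg : 0 ≤ g) (hdvd : g ∣ m) : pygcd g m = g := by
  refine Int.dvd_antisymm (pygcd_nonneg g m) hg (pygcd_dvd_left g m) (dvd_pygcd dvd_rfl hdvd)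

-- gcd of a list (gcd over nonempty subsequences is taken with listGcd)
def listGcd (l : List Int) : Int := l.foldr pygcd 0

lemma listGcd_nil : listGcd [] = 0 := rfl
lemma listGcd_cons (x : Int) (l : List Int) : listGcd (x :: l) = pygcd x (listGcd l) := rfl

lemma listGcd_nonneg (l : List Int) : 0 ≤ listGcd l := by
  cases l with
  | nil => simp [listGcd_nil]
  | cons x t => exact pygcd_nonneg _ _

lemma listGcd_dvd (l : List Int) : ∀ e ∈ l, listGcd l ∣ e := by
  induction l with
  | nil => simp
  | cons x t ih =>
    intro e he
    rcases List.mem_cons.1 he with h | h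
    · subst h; exact pygcd_dvd_left _ _
    · exact dvd_trans (pygcd_dvd_right _ _) (ih e h)

lemma dvd_listGcd {d : Int} (l : List Int) (h : ∀ e ∈ l, d ∣ e) : d ∣ listGcd l := by
  induction l with
  | nil => simp [listGcd_nil]
  | cons x t ih =>
    rw [listGcd_cons]
    exact dvd_pygcd (h x (by simp)) (ih (fun e he => h e (by simp [he])))

lemma listGcd_append (l₁ l₂ : List Int) : listGcd (l₁ ++ l₂) = pygcd (listGcd l₁) (listGcd l₂) := by
  induction l₁ with
  | nil => simp [listGcd_nil, pygcd_zero_left _ (listGcd_nonneg l₂)]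
  | cons x t ih => simp [listGcd_cons, ih, pygcd_assoc]

lemma listGcd_perm {l₁ l₂ : List Int} (h : l₁.Perm l₂) : listGcd l₁ = listGcd l₂ := by
  have : LeftCommutative pygcd := ⟨fun a b c => by
    rw [← pygcd_assoc, ← pygcd_assoc, pygcd_comm a b]⟩
  exact h.foldr_eq 0

lemma listGcd_const {l : List Int} {x : Int} (hx : 0 < x) (hne : l ≠ [])
    (h : ∀ e ∈ l, e = x) : listGcd l = x := by
  induction l with
  | nil => exact absurd rfl hne
  | cons y t ih =>
    have hy : y = x := h y (by simp)
    subst hy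
    cases t with
    | nil => simpa [listGcd_cons, listGcd_nil] using pygcd_zero_right y (le_of_lt hx)
    | cons z t' =>
      rw [listGcd_cons, ih (by simp) (fun e he => h e (by simp [he]))]
      exact pygcd_fix (le_of_lt hx) dvd_rfl

-- g is the gcd of some nonempty subsequence of the positive elements of nums
def Reach (nums : List Int) (g : Int) : Prop :=
  ∃ l : List Int, l ≠ [] ∧ (∀ x ∈ l, x ∈ nums ∧ 0 < x) ∧ listGcd l = g

lemma reach_nil (g : Int) : ¬ Reach [] g := by
  rintro ⟨l, hne, hmem, -⟩
  cases l with
  | nil => exact hne rfl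
  | cons x t => exact absurd (hmem x (by simp)).1 (by simp)

lemma reach_pos {nums : List Int} {g : Int} (h : Reach nums g) : 0 < g := by
  obtain ⟨l, hne, hmem, hgcd⟩ := h
  obtain ⟨e, he⟩ := List.exists_mem_of_ne_nil l hne
  have hd : g ∣ e := hgcd ▸ listGcd_dvd l e he
  have hge : 0 ≤ g := hgcd ▸ listGcd_nonneg l
  rcases lt_or_eq_of_le hge with h | h
  · exact h
  · exfalso; rw [← h] at hd; have := Int.zero_dvd.1 hd
    exact absurd ((hmem e he).2) (by omega)

lemma reach_le_max {nums : List Int} {g M : Int}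
    (hM : PySem.List.max? nums (fun x => x) = some M) (h : Reach nums g) : g ≤ M := by
  obtain ⟨l, hne, hmem, hgcd⟩ := h
  obtain ⟨e, he⟩ := List.exists_mem_of_ne_nil l hne
  have hd : g ∣ e := hgcd ▸ listGcd_dvd l e he
  have h1 : g ≤ e := Int.le_of_dvd (hmem e he).2 hd
  exact le_trans h1 (PySem.List.max?_isMax hM e (hmem e he).1)

lemma reach_append_pos (p : List Int) (x : Int) (hx : 0 < x) (g : Int) :
    Reach (p ++ [x]) g ↔ Reach p g ∨ (∃ h, Reach p h ∧ g = pygcd h x) ∨ g = x := by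
  constructor
  · rintro ⟨l, hne, hmem, hgcd⟩
    by_cases hxl : x ∈ l
    · have hperm := List.filter_append_perm (fun e => decide (e = x)) l
      have hsplit : listGcd l = pygcd (listGcd (l.filter (fun e => decide (e = x))))
          (listGcd (l.filter (fun e => !decide (e = x)))) := by
        rw [← listGcd_perm hperm, listGcd_append]
      have hfe : listGcd (l.filter (fun e => decide (e = x))) = x := by
        refine listGcd_const hx ?_ ?_
        · intro hnil
          have : x ∈ l.filter (fun e => decide (e = x)) := by
            simp [List.mem_filter, hxl]
          rw [hnil] at this; simp at this
        · intro e he; simpa using (List.mem_filter.1 he).2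
      set l' := l.filter (fun e => !decide (e = x)) with hl'
      by_cases hl'e : l' = []
      · right; right
        rw [← hgcd, hsplit, hfe, hl'e, listGcd_nil, pygcd_zero_right x (le_of_lt hx)]
      · right; left
        refine ⟨listGcd l', ⟨l', hl'e, ?_, rfl⟩, ?_⟩
        · intro e he
          have h1 := List.mem_filter.1 he
          have h2 := hmem e (List.mem_filter.1 he).1
          have hex : e ≠ x := by simpa using h1.2
          rcases List.mem_append.1 h2.1 with h | h
          · exact ⟨h, h2.2⟩
          · simp at h; exact absurd h hex
        · rw [← hgcd, hsplit, hfe, pygcd_comm]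
    · left
      refine ⟨l, hne, ?_, hgcd⟩
      intro e he
      have h2 := hmem e he
      rcases List.mem_append.1 h2.1 with h | h
      · exact ⟨h, h2.2⟩
      · simp at h; subst h; exact absurd he hxl
  · rintro (⟨l, hne, hmem, hgcd⟩ | ⟨h, ⟨l, hne, hmem, hgcd⟩, hg⟩ | hg)
    · exact ⟨l, hne, fun e he => ⟨List.mem_append.2 (Or.inl (hmem e he).1), (hmem e he).2⟩, hgcd⟩
    · refine ⟨l ++ [x], by simp, ?_, ?_⟩
      · intro e he
        rcases List.mem_append.1 he with h' | h'
        · exact ⟨List.mem_append.2 (Or.inl (hmem e h').1), (hmem e h').2⟩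
        · simp at h'; subst h'; exact ⟨by simp, hx⟩
      · rw [listGcd_append, hgcd, hg, listGcd_cons, listGcd_nil,
          pygcd_zero_right x (le_of_lt hx)]
    · subst hg
      exact ⟨[g], by simp, fun e he => by simp at he; subst he; exact ⟨by simp, hx⟩,
        by rw [listGcd_cons, listGcd_nil, pygcd_zero_right g (le_of_lt hx)]⟩

lemma reach_append_nonpos (p : List Int) (x : Int) (hx : ¬ 0 < x) (g : Int) :
    Reach (p ++ [x]) g ↔ Reach p g := by
  constructor
  · rintro ⟨l, hne, hmem, hgcd⟩
    refine ⟨l, hne, ?_, hgcd⟩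
    intro e he
    have h2 := hmem e he
    rcases List.mem_append.1 h2.1 with h | h
    · exact ⟨h, h2.2⟩
    · simp at h; subst h; exact absurd h2.2 hx
  · rintro ⟨l, hne, hmem, hgcd⟩
    exact ⟨l, hne, fun e he => ⟨List.mem_append.2 (Or.inl (hmem e he).1), (hmem e he).2⟩, hgcd⟩

-- B's fold maintains exactly the reachable gcds, without duplicates
lemma b_fold_inv (rest : List Int) : ∀ (p : List Int) (acc : PySem.Set Int),
    (∀ g, g ∈ acc ↔ Reach p g) → acc.Nodup →
    (∀ g, g ∈ rest.foldl bStep acc ↔ Reach (p ++ rest) g) ∧ (rest.foldl bStep acc).Nodup := by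
  induction rest with
  | nil => intro p acc hmem hnd; simpa using ⟨hmem, hnd⟩
  | cons x t ih =>
    intro p acc hmem hnd
    have hpx : p ++ x :: t = (p ++ [x]) ++ t := by simp
    rw [List.foldl_cons, hpx]
    by_cases hx : 0 < x
    · have hstep : bStep acc x =
          PySem.Set.union acc (PySem.Set.add (PySem.Set.ofList (acc.map (fun g => pygcd g x))) x) := by
        simp [bStep, hx]
      refine ih (p ++ [x]) _ ?_ ?_
      · intro g
        rw [hstep, PySem.Set.mem_union, PySem.Set.mem_add, PySem.Set.mem_ofList,
          List.mem_map, reach_append_pos p x hx g, hmem]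
        constructor
        · rintro (h | ⟨⟨h, hh, rfl⟩ | h⟩)
          · exact Or.inl h
          · exact Or.inr (Or.inl ⟨h, (hmem h).1 hh, rfl⟩)
          · exact Or.inr (Or.inr h)
        · rintro (h | ⟨h, hh, rfl⟩ | h)
          · exact Or.inl h
          · exact Or.inr (Or.inl ⟨h, (hmem h).2 hh, rfl⟩)
          · exact Or.inr (Or.inr h)
      · rw [hstep]; exact PySem.Set.nodup_union _ _ hnd
    · have hstep : bStep acc x = acc := by simp [bStep, hx]
      refine ih (p ++ [x]) _ ?_ ?_
      · intro g; rw [hstep, reach_append_nonpos p x hx g]; exact hmem g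
      · rw [hstep]; exact hnd

-- A's inner loop without the break
def fInner (ns : PySem.Set Int) (ms : List Int) (cur : Int) : Int :=
  ms.foldl (fun c m => if PySem.Set.contains ns m then pygcd c m else c) cur

lemma fInner_fix (ns : PySem.Set Int) {g : Int} (hg : 0 ≤ g) :
    ∀ ms : List Int, (∀ m ∈ ms, g ∣ m) → fInner ns ms g = g := by
  intro ms
  induction ms with
  | nil => intro _; rfl
  | cons m t ih =>
    intro h
    by_cases hm : PySem.Set.contains ns m
    · simp only [fInner, List.foldl_cons]
      rw [if_pos hm, pygcd_fix hg (h m (by simp))]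
      exact ih (fun e he => h e (by simp [he]))
    · simp only [fInner, List.foldl_cons]
      rw [if_neg hm]
      exact ih (fun e he => h e (by simp [he]))

lemma aInner_eq_iff (ns : PySem.Set Int) {g : Int} (hg : 0 < g) :
    ∀ (ms : List Int) (cur : Int), (∀ m ∈ ms, g ∣ m) →
    (aInner ns g ms cur = g ↔ fInner ns ms cur = g) := by
  intro ms
  induction ms with
  | nil => intro cur _; rfl
  | cons m t ih =>
    intro cur h
    by_cases hm : PySem.Set.contains ns m
    · by_cases heq : pygcd cur m = g
      · simp only [aInner, fInner, List.foldl_cons]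
        rw [if_pos hm, if_pos heq, if_pos hm, heq]
        have hfix : fInner ns t g = g :=
          fInner_fix ns (le_of_lt hg) t (fun e he => h e (by simp [he]))
        simp only [fInner] at hfix
        exact ⟨fun _ => hfix, fun _ => rfl⟩
      · simp only [aInner, fInner, List.foldl_cons]
        rw [if_pos hm, if_neg heq, if_pos hm]
        simpa [fInner] using ih (pygcd cur m) (fun e he => h e (by simp [he]))
    · simp only [aInner, fInner, List.foldl_cons]
      rw [if_neg hm, if_neg hm]
      simpa [fInner] using ih cur (fun e he => h e (by simp [he]))

lemma fInner_eq_listGcd (ns : PySem.Set Int) :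
    ∀ (ms : List Int) (cur : Int), 0 ≤ cur →
    fInner ns ms cur = pygcd cur (listGcd (ms.filter (fun m => PySem.Set.contains ns m))) := by
  intro ms
  induction ms with
  | nil => intro cur hc; simp [fInner, listGcd_nil, pygcd_zero_right cur hc]
  | cons m t ih =>
    intro cur hc
    by_cases hm : PySem.Set.contains ns m
    · simp only [fInner, List.foldl_cons, List.filter_cons]
      rw [if_pos hm, if_pos hm, listGcd_cons, ← pygcd_assoc]
      simpa [fInner] using ih (pygcd cur m) (pygcd_nonneg _ _)
    · simp only [fInner, List.foldl_cons, List.filter_cons]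
      rw [if_neg hm, if_neg hm]
      simpa [fInner] using ih cur hc

-- the candidate test of A is exactly reachability
lemma cond_iff_reach (nums : List Int) (M : Int)
    (hM : PySem.List.max? nums (fun x => x) = some M) (g : Int) (hg : 1 ≤ g) :
    (listGcd ((PySem.List.pyRange g (M + 1) g).filter
        (fun m => PySem.Set.contains (PySem.Set.ofList nums) m)) = g ↔ Reach nums g) := by
  have hgpos : (0 : Int) < g := hg
  set D := (PySem.List.pyRange g (M + 1) g).filter
      (fun m => PySem.Set.contains (PySem.Set.ofList nums) m) with hD
  constructor
  · intro h
    have hne : D ≠ [] := by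
      intro hnil; rw [hnil, listGcd_nil] at h; omega
    refine ⟨D, hne, ?_, h⟩
    intro e he
    have h1 := List.mem_filter.1 he
    have h2 := (PySem.List.mem_pyRange_iff_of_pos hgpos e).1 h1.1
    refine ⟨(PySem.Set.mem_ofList nums e).1 ((PySem.Set.contains_iff _ e).1 h1.2), by omega⟩
  · intro h
    obtain ⟨l, hne, hmem, hgcd⟩ := h
    have hsub : ∀ e ∈ l, e ∈ D := by
      intro e he
      have hd : g ∣ e := hgcd ▸ listGcd_dvd l e he
      have hpos := (hmem e he).2
      have hle : e ≤ M := PySem.List.max?_isMax hM e (hmem e he).1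
      refine List.mem_filter.2 ⟨(PySem.List.mem_pyRange_iff_of_pos hgpos e).2
        ⟨Int.le_of_dvd hpos hd, by omega, dvd_sub hd dvd_rfl⟩, ?_⟩
      exact (PySem.Set.contains_iff _ e).2 ((PySem.Set.mem_ofList nums e).2 (hmem e he).1)
    have h1 : g ∣ listGcd D := by
      refine dvd_listGcd D ?_
      intro m hm
      have h2 := (PySem.List.mem_pyRange_iff_of_pos hgpos m).1 (List.mem_filter.1 hm).1
      have h3 : g ∣ m - g + g := dvd_add h2.2.2 dvd_rfl
      simpa using h3
    have h2 : listGcd D ∣ g := by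
      rw [← hgcd]
      exact dvd_listGcd l (fun e he => listGcd_dvd D e (hsub e he))
    exact Int.dvd_antisymm (listGcd_nonneg D) (by omega) h2 h1

-- counting fold = length of the filtered list
lemma foldl_count (p : Int → Prop) [DecidablePred p] :
    ∀ (l : List Int) (n : Int),
    l.foldl (fun c g => if p g then c + 1 else c) n = n + ((l.filter (fun g => decide (p g))).length : Int) := by
  intro l
  induction l with
  | nil => intro n; simp
  | cons x t ih =>
    intro n
    by_cases hx : p x
    · simp [hx, ih]; omega
    · simp [hx, ih]

-- ===== VERDICT (by name: the statement is the Claim_ definition above) =====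
theorem countDifferentSubsequenceGCDs_spec : Claim_equal_countDifferentSubsequenceGCDs := by
  intro nums _ hpre
  unfold Spec_countDifferentSubsequenceGCDs
  -- the DP set of B: members = reachable gcds, no duplicates
  obtain ⟨hBmem, hBnd⟩ := b_fold_inv nums [] PySem.Set.empty
    (fun g => by
      constructor
      · intro h; exact absurd h (by simp [PySem.Set.empty])
      · intro h; exact absurd h (reach_nil g))
    (by simp [PySem.Set.empty])
  simp only [List.nil_append] at hBmem
  -- A's side
  rcases hMax : PySem.List.max? nums (fun x => x) with _ | M
  · exact absurd ((PySem.List.max?_eq_none_iff nums _).1 hMax) hpre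
  · have hA : countDifferentSubsequenceGCDs nums =
        ((PySem.List.pyRange 1 (M + 1) 1).filter
          (fun g => decide (aInner (PySem.Set.ofList nums) g
            (PySem.List.pyRange g (M + 1) g) 0 = g))).length := by
      simp only [countDifferentSubsequenceGCDs, hMax]
      rw [foldl_count (fun g => aInner (PySem.Set.ofList nums) g
        (PySem.List.pyRange g (M + 1) g) 0 = g)]
      simp
    set F := (PySem.List.pyRange 1 (M + 1) 1).filter
        (fun g => decide (aInner (PySem.Set.ofList nums) g
          (PySem.List.pyRange g (M + 1) g) 0 = g)) with hF
    have hcond : ∀ g : Int, 1 ≤ g →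
        ((aInner (PySem.Set.ofList nums) g (PySem.List.pyRange g (M + 1) g) 0 = g) ↔
          Reach nums g) := by
      intro g hg
      have hgpos : (0 : Int) < g := hg
      have hdvd : ∀ m ∈ PySem.List.pyRange g (M + 1) g, g ∣ m := by
        intro m hm
        have h2 := (PySem.List.mem_pyRange_iff_of_pos hgpos m).1 hm
        have h3 : g ∣ m - g + g := dvd_add h2.2.2 dvd_rfl
        simpa using h3
      rw [aInner_eq_iff (PySem.Set.ofList nums) hgpos _ 0 hdvd,
        fInner_eq_listGcd (PySem.Set.ofList nums) _ 0 le_rfl,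
        pygcd_zero_left _ (listGcd_nonneg _)]
      exact cond_iff_reach nums M hMax g hg
    have hFmem : ∀ g, g ∈ F ↔ Reach nums g := by
      intro g
      rw [hF, List.mem_filter, PySem.List.mem_pyRange_one]
      constructor
      · rintro ⟨⟨h1, h2⟩, h3⟩
        exact (hcond g h1).1 (by simpa using h3)
      · intro h
        have h1 : 1 ≤ g := reach_pos h
        have h2 : g ≤ M := reach_le_max hMax h
        exact ⟨⟨h1, by omega⟩, by simpa using (hcond g h1).2 h⟩
    have hFnd : F.Nodup := (PySem.List.nodup_pyRange_one 1 (M + 1)).filter _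
    have hperm : F.Perm (nums.foldl bStep PySem.Set.empty) :=
      (List.perm_ext_iff_of_nodup hFnd hBnd).2 (fun g => by rw [hFmem g, hBmem g])
    rw [hA, countDifferentSubsequenceGCDs_alt]
    simp [PySem.Set.len, hperm.length_eq]
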